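-- pv_equiv track=rewrite | github.com/adjl/baybayin-encoder | app/app.py | parse_syllable
-- ===== SOURCE A (Python) =====
-- vowels = 'aeiou'
--
-- modifiers = '\\:'
--
-- def parse_syllable(syllable):
--     if syllable[-1] == ' ':
--         return '', '', ''
--
--     def find_index(i, func):
--         while i < len(syllable) and func(syllable[i]):
--             i += 1
--         return i
--
--     cons_i = find_index(0, lambda char: char not in vowels + modifiers)
--     vow_i = find_index(cons_i, lambda char: char in vowels)
--     return syllable[:cons_i], syllable[cons_i:vow_i], syllable[vow_i:]
-- ===== SOURCE B (Python) =====
-- def parse_syllable(syllable):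
--     if syllable[-1] == ' ':
--         return '', '', ''
--     cons, vow, rest = [], [], []
--     state = 0
--     for c in syllable:
--         if state == 0 and c not in 'aeiou\\:':
--             cons.append(c)
--         elif state != 2 and c in 'aeiou':
--             state = 1
--             vow.append(c)
--         else:
--             state = 2
--             rest.append(c)
--     return ''.join(cons), ''.join(vow), ''.join(rest)
-- ===== Notes on version B (the rewrite author's own statement) =====
-- stated objective: alternative
-- what changed: Replaced A's two index-advancing while-loop scans plus slicing by a single-pass three-state machine (fold over the characters) that appends each character to its consonant/vowel/remainder buffer directly.
import Mathlib
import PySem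

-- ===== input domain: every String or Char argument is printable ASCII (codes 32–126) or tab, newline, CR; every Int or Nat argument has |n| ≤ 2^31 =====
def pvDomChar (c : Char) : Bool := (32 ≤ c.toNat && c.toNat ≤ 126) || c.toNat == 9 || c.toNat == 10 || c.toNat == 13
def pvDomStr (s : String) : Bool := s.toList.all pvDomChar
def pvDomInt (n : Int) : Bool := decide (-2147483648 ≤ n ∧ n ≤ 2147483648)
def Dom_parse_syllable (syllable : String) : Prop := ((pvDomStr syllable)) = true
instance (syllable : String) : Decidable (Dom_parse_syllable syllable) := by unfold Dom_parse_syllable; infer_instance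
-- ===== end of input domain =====

-- B replaces A's two while-loop index scans + slicing with a single-pass three-state fold; same cost, different structure.

-- ===== PORT A =====
-- char ∈ 'aeiou'
def pvIsVowel (c : Char) : Bool := c = 'a' || c = 'e' || c = 'i' || c = 'o' || c = 'u'
-- char ∈ vowels + modifiers = 'aeiou\:'
def pvIsVowMod (c : Char) : Bool := pvIsVowel c || c = '\\' || c = ':'

-- find_index: while i < len(syllable) and func(syllable[i]): i += 1
def pvFindIndex (s : List Char) (f : Char → Bool) (i : Nat) : Nat :=
  if h : i < s.length then
    if f s[i] then pvFindIndex s f (i + 1) else i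
  else i
termination_by s.length - i

def parse_syllable (syllable : String) : String × String × String :=
  -- if syllable[-1] == ' ': return '', '', ''   (IndexError on empty → excluded by Pre_)
  match PySem.Str.pyGet? syllable (-1) with
  | none => ("", "", "")
  | some last =>
    if last = ' ' then ("", "", "")
    else
      let cs := syllable.toList
      let cons_i := pvFindIndex cs (fun c => !(pvIsVowMod c)) 0
      let vow_i := pvFindIndex cs (fun c => pvIsVowel c) cons_i
      (String.ofList (PySem.List.slice cs none (some (cons_i : Int))),
       String.ofList (PySem.List.slice cs (some (cons_i : Int)) (some (vow_i : Int))),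
       String.ofList (PySem.List.slice cs (some (vow_i : Int)) none))

-- ===== PORT B =====
-- one step of the state machine: state 0 = consonant prefix, 1 = vowel run, 2 = remainder
def pvStep (acc : Nat × List Char × List Char × List Char) (c : Char) :
    Nat × List Char × List Char × List Char :=
  let (st, cons, vow, rest) := acc
  if st = 0 && !(pvIsVowMod c) then (st, cons ++ [c], vow, rest)
  else if st ≠ 2 && pvIsVowel c then (1, cons, vow ++ [c], rest)
  else (2, cons, vow, rest ++ [c])

def parse_syllable_alt (syllable : String) : String × String × String :=
  match PySem.Str.pyGet? syllable (-1) with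
  | none => ("", "", "")
  | some last =>
    if last = ' ' then ("", "", "")
    else
      let r := syllable.toList.foldl pvStep (0, [], [], [])
      (String.ofList r.2.1, String.ofList r.2.2.1, String.ofList r.2.2.2)

-- ===== PRECONDITION & SPEC =====
-- Pre_ excludes only the empty string, on which A raises IndexError at syllable[-1].
def Pre_parse_syllable (syllable : String) : Prop := syllable ≠ ""
instance (syllable : String) : Decidable (Pre_parse_syllable syllable) := by unfold Pre_parse_syllable; infer_instance
def pvWitness_parse_syllable : String := "ba:"
def Spec_parse_syllable (syllable : String) (out : String × String × String) : Prop := out = parse_syllable_alt syllable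
instance (syllable : String) (out : String × String × String) : Decidable (Spec_parse_syllable syllable out) := by unfold Spec_parse_syllable; infer_instance

-- ===== CLAIM (what is proved, stated in full; the proofs are below) =====
def Claim_equal_parse_syllable : Prop := ∀ (syllable : String), Dom_parse_syllable syllable → Pre_parse_syllable syllable → Spec_parse_syllable syllable (parse_syllable syllable)

-- ===== LEMMAS AND PROOFS =====

theorem pv_dropWhile_eq_drop (xs : List Char) (p : Char → Bool) :
    xs.drop (xs.takeWhile p).length = xs.dropWhile p := by
  induction xs with
  | nil => rfl
  | cons a l ih => by_cases h : p a <;> simp [h, ih]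

theorem pv_take_takeWhile (xs : List Char) (p : Char → Bool) :
    xs.take (xs.takeWhile p).length = xs.takeWhile p := by
  induction xs with
  | nil => rfl
  | cons a l ih => by_cases h : p a <;> simp [h, ih]

theorem pvFindIndex_eq (s : List Char) (f : Char → Bool) (i : Nat) :
    pvFindIndex s f i = i + ((s.drop i).takeWhile f).length := by
  unfold pvFindIndex
  split
  · rename_i h
    rw [List.drop_eq_getElem_cons h]
    by_cases hf : f s[i]
    · simp only [hf, if_true, List.takeWhile_cons, pvFindIndex_eq s f (i + 1)]
      simp; omega
    · simp [hf]
  · rename_i h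
    rw [List.drop_eq_nil_of_le (by omega)]
    simp
termination_by s.length - i

theorem pv_fold2 (cs : List Char) (a b r : List Char) :
    cs.foldl pvStep (2, a, b, r) = (2, a, b, r ++ cs) := by
  induction cs generalizing r with
  | nil => simp
  | cons c cs ih =>
    simp only [List.foldl_cons]
    have hs : pvStep (2, a, b, r) c = (2, a, b, r ++ [c]) := by simp [pvStep]
    rw [hs, ih]; simp

theorem pv_fold1 (cs : List Char) (a b r : List Char) :
    (cs.foldl pvStep (1, a, b, r)).2 =
      (a, b ++ cs.takeWhile pvIsVowel, r ++ cs.dropWhile pvIsVowel) := by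
  induction cs generalizing b r with
  | nil => simp
  | cons c cs ih =>
    simp only [List.foldl_cons]
    by_cases hv : pvIsVowel c
    · have hs : pvStep (1, a, b, r) c = (1, a, b ++ [c], r) := by simp [pvStep, hv]
      rw [hs, ih]; simp [hv]
    · have hs : pvStep (1, a, b, r) c = (2, a, b, r ++ [c]) := by simp [pvStep, hv]
      rw [hs, pv_fold2]; simp [hv]

theorem pv_fold0 (cs : List Char) (a b r : List Char) :
    (cs.foldl pvStep (0, a, b, r)).2 =
      (a ++ cs.takeWhile (fun c => !(pvIsVowMod c)),
       b ++ (cs.dropWhile (fun c => !(pvIsVowMod c))).takeWhile pvIsVowel,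
       r ++ (cs.dropWhile (fun c => !(pvIsVowMod c))).dropWhile pvIsVowel) := by
  induction cs generalizing a with
  | nil => simp
  | cons c cs ih =>
    simp only [List.foldl_cons]
    by_cases hm : pvIsVowMod c
    · by_cases hv : pvIsVowel c
      · have hs : pvStep (0, a, b, r) c = (1, a, b ++ [c], r) := by simp [pvStep, hm, hv]
        rw [hs, pv_fold1]; simp [hm, hv]
      · have hs : pvStep (0, a, b, r) c = (2, a, b, r ++ [c]) := by simp [pvStep, hm, hv]
        rw [hs, pv_fold2]; simp [hm, hv]
    · have hs : pvStep (0, a, b, r) c = (0, a ++ [c], b, r) := by simp [pvStep, hm]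
      rw [hs, ih]; simp [hm]

theorem parse_syllable_main (s : String) : parse_syllable s = parse_syllable_alt s := by
  unfold parse_syllable parse_syllable_alt
  cases h : PySem.Str.pyGet? s (-1) with
  | none => rfl
  | some last =>
    by_cases hl : last = ' '
    · simp [hl]
    · simp only [hl]
      have hg0 : pvFindIndex s.toList (fun c => !(pvIsVowMod c)) 0
          = (s.toList.takeWhile (fun c => !(pvIsVowMod c))).length := by
        rw [pvFindIndex_eq]; simp
      have hdrop : s.toList.drop (s.toList.takeWhile (fun c => !(pvIsVowMod c))).length
          = s.toList.dropWhile (fun c => !(pvIsVowMod c)) := pv_dropWhile_eq_drop _ _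
      rw [pv_fold0, hg0, pvFindIndex_eq, hdrop]
      rw [PySem.List.slice_to_natCast, PySem.List.slice_from_natCast,
        PySem.List.slice_natCast, Nat.add_sub_cancel_left]
      rw [hdrop, pv_take_takeWhile, pv_take_takeWhile]
      rw [← List.drop_drop, hdrop, pv_dropWhile_eq_drop]
      simp

-- ===== VERDICT (by name: the statement is the Claim_ definition above) =====
theorem parse_syllable_spec : Claim_equal_parse_syllable := by
  intro s _ _
  unfold Spec_parse_syllable
  exact parse_syllable_main s
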